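-- pv_equiv track=rewrite | github.com/ghghwldk/programmers-note | 꼭풀어야하는것/implementationGreedy/틀림1_광물캐기/solution_시간초과.py | getCostPerPartition
-- ===== SOURCE A (Python) =====
-- def getCostPerPartition(partition, 곡괭이):
--     cost = 0
--     for mineral in partition:
--         if 곡괭이 == 'dia':
--             if mineral =='diamond':
--                 cost += 1
--             elif mineral == 'iron':
--                 cost += 1
--             elif mineral == 'stone':
--                 cost += 1
--         elif 곡괭이 =='iron':
--             if mineral =='diamond':
--                 cost += 5
--             elif mineral == 'iron':
--                 cost += 1
--             elif mineral == 'stone':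
--                 cost += 1
--         else:
--             if mineral =='diamond':
--                 cost += 25
--             elif mineral == 'iron':
--                 cost += 5
--             elif mineral == 'stone':
--                 cost += 1
--     return cost
-- ===== SOURCE B (Python) =====
-- def getCostPerPartition(partition, 곡괭이):
--     d = partition.count('diamond')
--     i = partition.count('iron')
--     s = partition.count('stone')
--     if 곡괭이 == 'dia':
--         return d + i + s
--     if 곡괭이 == 'iron':
--         return 5 * d + i + s
--     return 25 * d + 5 * i + s
-- ===== Notes on version B (the rewrite author's own statement) =====
-- stated objective: simpler
-- what changed: B replaces the per-element nested if-chain with three count() tallies of the mineral kinds followed by one weighted sum chosen by the pickaxe.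
import Mathlib
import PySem

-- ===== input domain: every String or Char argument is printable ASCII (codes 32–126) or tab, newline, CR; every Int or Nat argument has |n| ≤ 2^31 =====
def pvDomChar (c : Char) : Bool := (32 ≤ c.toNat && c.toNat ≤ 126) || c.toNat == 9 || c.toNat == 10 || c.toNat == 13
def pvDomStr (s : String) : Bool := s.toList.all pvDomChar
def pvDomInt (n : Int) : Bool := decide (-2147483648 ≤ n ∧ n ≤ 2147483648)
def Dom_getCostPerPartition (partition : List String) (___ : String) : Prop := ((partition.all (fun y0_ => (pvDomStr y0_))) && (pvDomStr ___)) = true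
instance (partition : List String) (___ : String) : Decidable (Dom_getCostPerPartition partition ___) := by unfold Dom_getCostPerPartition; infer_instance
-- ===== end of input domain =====

-- B tallies the three mineral kinds once and returns a single weighted sum per pickaxe (simpler decomposition than A's per-element if-chain).


-- ===== PORT A =====
def stepA (___ : String) (cost : Int) (mineral : String) : Int :=
  if ___ = "dia" then
    if mineral = "diamond" then cost + 1
    else if mineral = "iron" then cost + 1
    else if mineral = "stone" then cost + 1
    else cost
  else if ___ = "iron" then
    if mineral = "diamond" then cost + 5
    else if mineral = "iron" then cost + 1
    else if mineral = "stone" then cost + 1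
    else cost
  else
    if mineral = "diamond" then cost + 25
    else if mineral = "iron" then cost + 5
    else if mineral = "stone" then cost + 1
    else cost

def getCostPerPartition (partition : List String) (___ : String) : Int :=
  partition.foldl (stepA ___) 0

-- ===== PORT B =====
def getCostPerPartition_alt (partition : List String) (___ : String) : Int :=
  let d : Int := partition.count "diamond"
  let i : Int := partition.count "iron"
  let s : Int := partition.count "stone"
  if ___ = "dia" then d + i + s
  else if ___ = "iron" then 5 * d + i + s
  else 25 * d + 5 * i + s

-- ===== PRECONDITION & SPEC =====
def Spec_getCostPerPartition (partition : List String) (___ : String) (out : Int) : Prop := out = getCostPerPartition_alt partition ___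
instance (partition : List String) (___ : String) (out : Int) : Decidable (Spec_getCostPerPartition partition ___ out) := by unfold Spec_getCostPerPartition; infer_instance

-- ===== CLAIM (what is proved, stated in full; the proofs are below) =====
def Claim_equal_getCostPerPartition : Prop := ∀ (partition : List String) (___ : String), Dom_getCostPerPartition partition ___ → Spec_getCostPerPartition partition ___ (getCostPerPartition partition ___)

-- ===== LEMMAS AND PROOFS =====
theorem loop_eq (___ : String) (l : List String) : ∀ c : Int,
    l.foldl (stepA ___) c = c + getCostPerPartition_alt l ___ := by
  induction l with
  | nil =>
    intro c
    simp [getCostPerPartition_alt]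
  | cons m t ih =>
    intro c
    simp only [List.foldl_cons, ih]
    simp only [getCostPerPartition_alt, stepA, List.count_cons, beq_iff_eq]
    split_ifs <;> (try (push_cast; ring)) <;> (exfalso; subst_vars; simp_all)

-- ===== VERDICT (by name: the statement is the Claim_ definition above) =====
theorem getCostPerPartition_spec : Claim_equal_getCostPerPartition := by
  intro partition ___ _
  unfold Spec_getCostPerPartition getCostPerPartition
  simpa using loop_eq ___ partition 0
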